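-- pv_equiv track=rewrite | github.com/OverlordPigeon/aois | lab3/main.py | validate_table_implicants
-- ===== SOURCE A (Python) =====
-- def validate_table_implicants(table):
--     correct_implicants = []
--
--     for i in range(1, len(table[2])):
--         ones_count = {'count': 0, 'index': 0}
--
--         for j in range(2, len(table)):
--             if table[j][i] == 1:
--                 ones_count['count'] += 1
--                 ones_count['index'] = j
--
--         if ones_count['count'] == 1:
--             correct_implicants.append(table[ones_count['index']][0])
--
--     return list(set(correct_implicants))
-- ===== SOURCE B (Python) =====
-- def validate_table_implicants(table):
--     ncols = len(table[2])
--     # one row-major pass: per-column (ones_count, last_row_with_one) accumulators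
--     counts = [(0, 0)] * ncols
--     for j in range(2, len(table)):
--         row = table[j]
--         for i in range(1, ncols):
--             if row[i] == 1:
--                 counts[i] = (counts[i][0] + 1, j)
--     result = []
--     for i in range(1, ncols):
--         c = counts[i]
--         if c[0] == 1:
--             result.append(table[c[1]][0])
--     return list(set(result))
-- ===== Notes on version B (the rewrite author's own statement) =====
-- stated objective: faster
-- what changed: A rescans all rows once per column (column-major nested recount); B makes a single row-major pass that maintains an array of per-column (count, last-row) accumulators and then emits the unique-cover implicants in one final sweep over the accumulators.
import Mathlib
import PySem

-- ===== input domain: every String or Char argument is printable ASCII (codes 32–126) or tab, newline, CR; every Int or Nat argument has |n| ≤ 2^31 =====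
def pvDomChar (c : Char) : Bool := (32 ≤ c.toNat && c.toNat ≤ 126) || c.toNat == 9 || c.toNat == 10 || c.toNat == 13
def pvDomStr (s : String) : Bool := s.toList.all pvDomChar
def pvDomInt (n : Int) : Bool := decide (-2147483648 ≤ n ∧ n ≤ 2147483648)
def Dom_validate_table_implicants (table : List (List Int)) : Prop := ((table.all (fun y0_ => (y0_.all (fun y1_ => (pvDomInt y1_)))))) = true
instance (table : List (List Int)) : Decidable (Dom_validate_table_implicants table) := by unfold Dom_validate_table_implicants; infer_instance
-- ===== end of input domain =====

-- B replaces A's column-major recount (rescanning all rows for every column) by a single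
-- row-major pass over an array of per-column (count, last-row) accumulators; same cost class.


-- ===== PORT A =====
-- list(set(xs)) is ported as PySem.Set.ofList (outputs are compared as sets)
def validate_table_implicants (table : List (List Int)) : List Int :=
  let correct_implicants : List Int :=
    (PySem.List.pyRange 1 ((PySem.List.pyGetD table 2 []).length : Int) 1).foldl
      (fun acc i =>
        let oc : Int × Int :=
          (PySem.List.pyRange 2 (table.length : Int) 1).foldl
            (fun (oc : Int × Int) j =>
              if PySem.List.pyGetD (PySem.List.pyGetD table j []) i 0 = 1
              then (oc.1 + 1, j) else oc)
            ((0 : Int), (0 : Int))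
        if oc.1 = 1
        then acc ++ [PySem.List.pyGetD (PySem.List.pyGetD table oc.2 []) 0 0]
        else acc)
      []
  PySem.Set.ofList correct_implicants

-- ===== PORT B =====
def validate_table_implicants_alt (table : List (List Int)) : List Int :=
  let ncols : Int := ((PySem.List.pyGetD table 2 []).length : Int)
  let counts0 : List (Int × Int) := List.replicate ncols.toNat ((0 : Int), (0 : Int))
  let counts : List (Int × Int) :=
    (PySem.List.pyRange 2 (table.length : Int) 1).foldl
      (fun cs j =>
        let row := PySem.List.pyGetD table j []
        (PySem.List.pyRange 1 ncols 1).foldl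
          (fun cs i =>
            if PySem.List.pyGetD row i 0 = 1
            then PySem.List.pySetD cs i
                   ((PySem.List.pyGetD cs i ((0 : Int), (0 : Int))).1 + 1, j)
            else cs)
          cs)
      counts0
  let result : List Int :=
    (PySem.List.pyRange 1 ncols 1).foldl
      (fun acc i =>
        let c := PySem.List.pyGetD counts i ((0 : Int), (0 : Int))
        if c.1 = 1
        then acc ++ [PySem.List.pyGetD (PySem.List.pyGetD table c.2 []) 0 0]
        else acc)
      []
  PySem.Set.ofList result

-- ===== PRECONDITION & SPEC =====
-- Pre_ excludes exactly the inputs where the Python A raises IndexError: fewer than 3 rows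
-- (table[2] fails), or some scanned row shorter than row 2 when row 2 has more than one column.
def Pre_validate_table_implicants (table : List (List Int)) : Prop :=
  3 ≤ table.length ∧
    (1 < (table.getD 2 []).length →
      ∀ row ∈ table.drop 2, (table.getD 2 []).length ≤ row.length)
instance (table : List (List Int)) : Decidable (Pre_validate_table_implicants table) := by
  unfold Pre_validate_table_implicants; infer_instance

def pvWitness_validate_table_implicants : List (List Int) :=
  [[9], [8], [1, 0, 1], [2, 1, 0], [3, 1, 1]]

def Spec_validate_table_implicants (table : List (List Int)) (out : List Int) : Prop := out = validate_table_implicants_alt table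
instance (table : List (List Int)) (out : List Int) : Decidable (Spec_validate_table_implicants table out) := by unfold Spec_validate_table_implicants; infer_instance

-- ===== CLAIM (what is proved, stated in full; the proofs are below) =====
def Claim_equal_validate_table_implicants : Prop := ∀ (table : List (List Int)), Dom_validate_table_implicants table → Pre_validate_table_implicants table → Spec_validate_table_implicants table (validate_table_implicants table)

-- ===== LEMMAS AND PROOFS =====

-- the per-row inner loop of B, and the per-column accumulator step of A, as named functions
def vtiInner (table : List (List Int)) (j : Int) (cs : List (Int × Int)) (i : Int) :
    List (Int × Int) :=
  if PySem.List.pyGetD (PySem.List.pyGetD table j []) i 0 = 1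
  then PySem.List.pySetD cs i ((PySem.List.pyGetD cs i ((0 : Int), (0 : Int))).1 + 1, j)
  else cs

def vtiCol (table : List (List Int)) (i : Int) (oc : Int × Int) (j : Int) : Int × Int :=
  if PySem.List.pyGetD (PySem.List.pyGetD table j []) i 0 = 1 then (oc.1 + 1, j) else oc

theorem vti_len_inner (table : List (List Int)) (j : Int) (C : List Int)
    (cs : List (Int × Int)) :
    (C.foldl (vtiInner table j) cs).length = cs.length := by
  induction C generalizing cs with
  | nil => rfl
  | cons a C ih =>
    rw [List.foldl_cons, ih]
    unfold vtiInner
    split <;> simp [PySem.List.length_pySetD]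

-- value at a nonnegative in-range index after one inner (per-row) pass
theorem vti_get_inner (table : List (List Int)) (j : Int) (C : List Int)
    (hnd : C.Nodup) (cs : List (Int × Int)) (k : Int) (hk0 : 0 ≤ k)
    (h0 : ∀ x ∈ C, 0 ≤ x) (hl : ∀ x ∈ C, x < (cs.length : Int)) :
    PySem.List.pyGetD (C.foldl (vtiInner table j) cs) k ((0 : Int), (0 : Int))
      = if k ∈ C ∧ PySem.List.pyGetD (PySem.List.pyGetD table j []) k 0 = 1
        then ((PySem.List.pyGetD cs k ((0 : Int), (0 : Int))).1 + 1, j)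
        else PySem.List.pyGetD cs k ((0 : Int), (0 : Int)) := by
  induction C generalizing cs with
  | nil => simp
  | cons a C ih =>
    have ha0 : 0 ≤ a := h0 a (by simp)
    have hal : a < (cs.length : Int) := hl a (by simp)
    have hnd' : C.Nodup := hnd.of_cons
    have hanotin : a ∉ C := by
      intro h; exact (List.nodup_cons.mp hnd).1 h
    rw [List.foldl_cons]
    have hlen : (vtiInner table j cs a).length = cs.length := by
      unfold vtiInner; split <;> simp [PySem.List.length_pySetD]
    rw [ih hnd' (vtiInner table j cs a) (fun x hx => h0 x (by simp [hx]))
        (fun x hx => by rw [hlen]; exact hl x (by simp [hx]))]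
    -- rewrite pyGetD of the one-step state
    have hget : ∀ m : Int, 0 ≤ m →
        PySem.List.pyGetD (vtiInner table j cs a) m ((0 : Int), (0 : Int))
          = if m = a ∧ PySem.List.pyGetD (PySem.List.pyGetD table j []) a 0 = 1
            then ((PySem.List.pyGetD cs a ((0 : Int), (0 : Int))).1 + 1, j)
            else PySem.List.pyGetD cs m ((0 : Int), (0 : Int)) := by
      intro m hm0
      unfold vtiInner
      by_cases hc : PySem.List.pyGetD (PySem.List.pyGetD table j []) a 0 = 1
      · have ha' : (a.toNat : Int) = a := Int.toNat_of_nonneg ha0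
        have hm' : (m.toNat : Int) = m := Int.toNat_of_nonneg hm0
        have hlt : a.toNat < cs.length := by omega
        have key := PySem.List.pyGetD_pySetD_natCast cs a.toNat m.toNat
          ((PySem.List.pyGetD cs a ((0 : Int), (0 : Int))).1 + 1, j)
          ((0 : Int), (0 : Int)) hlt
        rw [ha', hm'] at key
        rw [if_pos hc, key]
        by_cases hma : m = a
        · rw [if_pos (by omega), if_pos ⟨hma, hc⟩]
        · rw [if_neg (by omega), if_neg (fun h => hma h.1)]
      · rw [if_neg hc, if_neg (fun h => hc h.2)]
    rw [hget k hk0]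
    by_cases hka : k = a
    · subst hka
      by_cases hc : PySem.List.pyGetD (PySem.List.pyGetD table j []) k 0 = 1
      · simp [hc, hanotin]
      · simp [hc, hanotin]
    · simp [hka]

-- loop interchange: after B's row-major pass, slot k holds A's per-column fold for column k
theorem vti_outer (table : List (List Int)) (N : Int) (js : List Int)
    (cs : List (Int × Int)) (k : Int) (hk : 1 ≤ k ∧ k < N)
    (hNl : N ≤ (cs.length : Int)) :
    PySem.List.pyGetD
        (js.foldl (fun cs j => (PySem.List.pyRange 1 N 1).foldl (vtiInner table j) cs) cs)
        k ((0 : Int), (0 : Int))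
      = js.foldl (vtiCol table k) (PySem.List.pyGetD cs k ((0 : Int), (0 : Int))) := by
  induction js generalizing cs with
  | nil => rfl
  | cons j js ih =>
    rw [List.foldl_cons, List.foldl_cons]
    rw [ih ((PySem.List.pyRange 1 N 1).foldl (vtiInner table j) cs)
        (by rw [vti_len_inner]; exact hNl)]
    congr 1
    rw [vti_get_inner table j _ (PySem.List.nodup_pyRange_one 1 N) cs k (by omega)
        (fun x hx => by have := PySem.List.mem_pyRange_one.mp hx; omega)
        (fun x hx => by have := PySem.List.mem_pyRange_one.mp hx; omega)]
    have hkC : k ∈ PySem.List.pyRange 1 N 1 := PySem.List.mem_pyRange_one.mpr ⟨hk.1, hk.2⟩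
    unfold vtiCol
    by_cases hc : PySem.List.pyGetD (PySem.List.pyGetD table j []) k 0 = 1 <;>
      simp [hkC, hc]

theorem pyGetD_replicate (n : Nat) (k : Int) (hk0 : 0 ≤ k) (hkn : k < (n : Int))
    (d : Int × Int) :
    PySem.List.pyGetD (List.replicate n d) k d = d := by
  rw [PySem.List.pyGetD_eq_getElem _ _ hk0 (by simp; omega)]
  simp

-- ===== VERDICT (by name: the statement is the Claim_ definition above) =====
theorem validate_table_implicants_spec : Claim_equal_validate_table_implicants := by
  intro table _ _
  unfold Spec_validate_table_implicants validate_table_implicants validate_table_implicants_alt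
  show PySem.Set.ofList _ = PySem.Set.ofList _
  congr 1
  apply PySem.List.foldl_congr_mem
  intro acc i hi
  have hib := PySem.List.mem_pyRange_one.mp hi
  dsimp only
  have hcounts :
      (PySem.List.pyGetD
        (List.foldl
          (fun cs j =>
            List.foldl
              (fun cs i =>
                if PySem.List.pyGetD (PySem.List.pyGetD table j []) i 0 = 1 then
                  PySem.List.pySetD cs i ((PySem.List.pyGetD cs i ((0 : Int), (0 : Int))).1 + 1, j)
                else cs)
              cs (PySem.List.pyRange 1 ((PySem.List.pyGetD table 2 []).length : Int) 1))
          (List.replicate (((PySem.List.pyGetD table 2 []).length : Int)).toNat ((0 : Int), (0 : Int)))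
          (PySem.List.pyRange 2 (table.length : Int) 1))
        i ((0 : Int), (0 : Int)))
      = List.foldl
          (fun (oc : Int × Int) j =>
            if PySem.List.pyGetD (PySem.List.pyGetD table j []) i 0 = 1 then (oc.1 + 1, j) else oc)
          ((0 : Int), (0 : Int)) (PySem.List.pyRange 2 (table.length : Int) 1) := by
    show PySem.List.pyGetD
        (List.foldl
          (fun cs j => List.foldl (vtiInner table j) cs
            (PySem.List.pyRange 1 ((PySem.List.pyGetD table 2 []).length : Int) 1))
          (List.replicate (((PySem.List.pyGetD table 2 []).length : Int)).toNat ((0 : Int), (0 : Int)))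
          (PySem.List.pyRange 2 (table.length : Int) 1))
        i ((0 : Int), (0 : Int))
      = List.foldl (vtiCol table i) ((0 : Int), (0 : Int))
          (PySem.List.pyRange 2 (table.length : Int) 1)
    rw [vti_outer table _ _ _ i ⟨hib.1, hib.2⟩ (by simp)]
    rw [pyGetD_replicate _ i (by omega) (by simp; omega)]
  rw [hcounts]
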